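-- pv_equiv track=rewrite | github.com/CMihai83/documentiulia.ro | services/ml/routers/content.py | generate_section_content
-- ===== SOURCE A (Python) =====
-- def generate_section_content(topic: str, target_words: int) -> str:
--     """Generate placeholder section content."""
--     paragraphs = []
--     words_generated = 0
--
--     sample_paragraphs = [
--         "Este important să înțelegem contextul actual al reglementărilor fiscale din România. "
--         "Modificările legislative recente au adus schimbări semnificative în modul în care "
--         "companiile trebuie să gestioneze obligațiile fiscale și raportările către ANAF.",
--
--         "Din perspectiva practică, implementarea corectă presupune parcurgerea mai multor etape. "
--         "Fiecare etapă are cerințe specifice care trebuie respectate pentru a asigura "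
--         "conformitatea cu legislația în vigoare.",
--
--         "Recomandăm consultarea documentației oficiale ANAF și colaborarea cu un specialist "
--         "pentru situații complexe. O abordare proactivă poate preveni problemele și poate "
--         "optimiza procesele de raportare.",
--
--         "Experiența practică arată că firmele care adoptă din timp noile cerințe au mai puține "
--         "dificultăți și costuri mai reduse pe termen lung. Planificarea adecvată este esențială.",
--     ]
--
--     while words_generated < target_words and sample_paragraphs:
--         para = sample_paragraphs.pop(0)
--         paragraphs.append(para)
--         words_generated += len(para.split())
--
--     return "\n\n".join(paragraphs)
-- ===== SOURCE B (Python) =====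
-- def generate_section_content(topic: str, target_words: int) -> str:
--     """Generate placeholder section content."""
--     sample_paragraphs = [
--         "Este important să înțelegem contextul actual al reglementărilor fiscale din România. "
--         "Modificările legislative recente au adus schimbări semnificative în modul în care "
--         "companiile trebuie să gestioneze obligațiile fiscale și raportările către ANAF.",
--
--         "Din perspectiva practică, implementarea corectă presupune parcurgerea mai multor etape. "
--         "Fiecare etapă are cerințe specifice care trebuie respectate pentru a asigura "
--         "conformitatea cu legislația în vigoare.",
--
--         "Recomandăm consultarea documentației oficiale ANAF și colaborarea cu un specialist "
--         "pentru situații complexe. O abordare proactivă poate preveni problemele și poate "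
--         "optimiza procesele de raportare.",
--
--         "Experiența practică arată că firmele care adoptă din timp noile cerințe au mai puține "
--         "dificultăți și costuri mai reduse pe termen lung. Planificarea adecvată este esențială.",
--     ]
--
--     # cumulative word counts, built once
--     cumulative = []
--     total = 0
--     for p in sample_paragraphs:
--         total += len(p.split())
--         cumulative.append(total)
--
--     # n = smallest number of paragraphs whose total reaches target_words, capped
--     if target_words <= 0:
--         n = 0
--     else:
--         n = len(sample_paragraphs)
--         for i, c in enumerate(cumulative):
--             if c >= target_words:
--                 n = i + 1
--                 break
--
--     return "\n\n".join(sample_paragraphs[:n])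
-- ===== Notes on version B (the rewrite author's own statement) =====
-- stated objective: alternative
-- what changed: Replaces the destructive pop/append/accumulate while-loop with a precomputed cumulative word-count table, a first-index search for the inclusive cutoff, and a single slice-and-join of the paragraph list.
import Mathlib
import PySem

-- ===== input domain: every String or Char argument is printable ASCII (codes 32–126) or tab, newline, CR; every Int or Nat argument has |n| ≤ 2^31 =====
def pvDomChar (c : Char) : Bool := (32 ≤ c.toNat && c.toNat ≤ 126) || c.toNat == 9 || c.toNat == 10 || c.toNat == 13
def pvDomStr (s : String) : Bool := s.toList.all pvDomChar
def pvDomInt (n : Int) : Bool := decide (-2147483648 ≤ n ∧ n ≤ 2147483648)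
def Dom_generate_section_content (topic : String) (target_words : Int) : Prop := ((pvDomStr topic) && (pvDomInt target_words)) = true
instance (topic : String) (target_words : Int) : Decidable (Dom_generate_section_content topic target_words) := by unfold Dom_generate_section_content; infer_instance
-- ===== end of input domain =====

-- B replaces A's grow-and-test while loop by a precomputed cumulative-word-count table,
-- a first-index search for the cutoff, and a single slice-and-join (objective: alternative decomposition).
-- 'topic' is unused by both programs, exactly as in the Python sources.

-- ===== PORT A =====
def pvSampleParagraphs : List String := ["Este important să înțelegem contextul actual al reglementărilor fiscale din România. Modificările legislative recente au adus schimbări semnificative în modul în care companiile trebuie să gestioneze obligațiile fiscale și raportările către ANAF.", "Din perspectiva practică, implementarea corectă presupune parcurgerea mai multor etape. Fiecare etapă are cerințe specifice care trebuie respectate pentru a asigura conformitatea cu legislația în vigoare.", "Recomandăm consultarea documentației oficiale ANAF și colaborarea cu un specialist pentru situații complexe. O abordare proactivă poate preveni problemele și poate optimiza procesele de raportare.", "Experiența practică arată că firmele care adoptă din timp noile cerințe au mai puține dificultăți și costuri mai reduse pe termen lung. Planificarea adecvată este esențială."]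

-- the while loop: pop the head, append it, add its word count, re-test the guard
def pvLoopA (paras : List String) (acc : List String) (words_generated : Int)
    (target_words : Int) : List String :=
  match paras with
  | [] => acc
  | p :: rest =>
      if words_generated < target_words then
        pvLoopA rest (acc ++ [p]) (words_generated + ((PySem.Str.split₀ p).length : Int)) target_words
      else acc

def generate_section_content (topic : String) (target_words : Int) : String :=
  PySem.Str.join "\n\n" (pvLoopA pvSampleParagraphs [] 0 target_words)

-- ===== PORT B =====
-- cumulative word counts, built once
def pvCumulative (paras : List String) (total : Int) : List Int :=
  match paras with
  | [] => []
  | p :: rest =>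
      let total' := total + ((PySem.Str.split₀ p).length : Int)
      total' :: pvCumulative rest total'

-- first index i (1-based i+1) whose cumulative count reaches target, else the cap
def pvFirstReach (cum : List Int) (target : Int) (i : Nat) (cap : Nat) : Nat :=
  match cum with
  | [] => cap
  | c :: rest => if target ≤ c then i + 1 else pvFirstReach rest target (i + 1) cap

def generate_section_content_alt (topic : String) (target_words : Int) : String :=
  let sample_paragraphs := pvSampleParagraphs
  let cumulative := pvCumulative sample_paragraphs 0
  let n : Nat :=
    if target_words ≤ 0 then 0
    else pvFirstReach cumulative target_words 0 sample_paragraphs.length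
  PySem.Str.join "\n\n" (sample_paragraphs.take n)

-- ===== PRECONDITION & SPEC =====
def Spec_generate_section_content (topic : String) (target_words : Int) (out : String) : Prop := out = generate_section_content_alt topic target_words
instance (topic : String) (target_words : Int) (out : String) : Decidable (Spec_generate_section_content topic target_words out) := by unfold Spec_generate_section_content; infer_instance

-- ===== CLAIM (what is proved, stated in full; the proofs are below) =====
def Claim_equal_generate_section_content : Prop := ∀ (topic : String) (target_words : Int), Dom_generate_section_content topic target_words → Spec_generate_section_content topic target_words (generate_section_content topic target_words)

-- ===== LEMMAS AND PROOFS =====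
-- shifting the running index of the cutoff search
theorem pvFirstReach_shift (cum : List Int) (t : Int) (i cap : Nat) :
    pvFirstReach cum t (i + 1) (cap + 1) = pvFirstReach cum t i cap + 1 := by
  induction cum generalizing i with
  | nil => rfl
  | cons c rest ih =>
    simp only [pvFirstReach]
    by_cases hc : t ≤ c
    · rw [if_pos hc, if_pos hc]
    · rw [if_neg hc, if_neg hc, ih]

-- the while loop appends exactly the slice of paragraphs up to the cutoff index
theorem pvLoopA_eq (paras acc : List String) (w t : Int) :
    pvLoopA paras acc w t =
      acc ++ paras.take
        (if t ≤ w then 0 else pvFirstReach (pvCumulative paras w) t 0 paras.length) := by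
  induction paras generalizing acc w with
  | nil => simp [pvLoopA]
  | cons p rest ih =>
    simp only [pvLoopA, pvCumulative, List.length]
    by_cases hw : w < t
    · rw [if_pos hw, ih, if_neg (by omega : ¬ t ≤ w)]
      simp only [pvFirstReach, Nat.zero_add]
      by_cases hc : t ≤ w + ((PySem.Str.split₀ p).length : Int)
      · rw [if_pos hc, if_pos hc]
        simp
      · rw [if_neg hc, if_neg hc,
          show (1 : Nat) = 0 + 1 from rfl, pvFirstReach_shift,
          List.take_succ_cons]
        simp
    · rw [if_neg hw, if_pos (by omega), List.take_zero, List.append_nil]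

theorem gsc_eq (topic : String) (target_words : Int) :
    generate_section_content topic target_words = generate_section_content_alt topic target_words := by
  unfold generate_section_content generate_section_content_alt
  rw [pvLoopA_eq]
  rfl

-- ===== VERDICT (by name: the statement is the Claim_ definition above) =====
theorem generate_section_content_spec : Claim_equal_generate_section_content := by
  intro topic target_words _
  exact gsc_eq topic target_words
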